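-- pv_equiv track=rewrite | github.com/HEEE23/programmers | 프로그래머스/2/12899. 124 나라의 숫자/124 나라의 숫자.py | solution
-- ===== SOURCE A (Python) =====
-- def solution(n):
--     answer = ''
--
--     country = [4, 1, 2]
--     lst = []
--
--     q = 1
--     while q != 0:
--         q = n // 3
--         r = n % 3
--         if r == 0:
--             q -= 1
--         lst.append(country[r])
--         n -= 1
--         n = n // 3
--
--     lst = lst[::-1]
--
--     answer = ''.join(map(str,lst))
--     return answer
-- ===== SOURCE B (Python) =====
-- def solution(n):
--     if n == 0:
--         return ''
--     return solution((n - 1) // 3) + '124'[(n - 1) % 3]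
-- ===== Notes on version B (the rewrite author's own statement) =====
-- stated objective: simpler
-- what changed: Replaced the while-loop that appends digits to a list, reverses it and joins, by a three-line recursion on the quotient that emits the most-significant digit first by indexing '124' with (n-1)%3.
-- outside the precondition, e.g. on solution(0): A does not finish within the time limit, B returns ''
import Mathlib
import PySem

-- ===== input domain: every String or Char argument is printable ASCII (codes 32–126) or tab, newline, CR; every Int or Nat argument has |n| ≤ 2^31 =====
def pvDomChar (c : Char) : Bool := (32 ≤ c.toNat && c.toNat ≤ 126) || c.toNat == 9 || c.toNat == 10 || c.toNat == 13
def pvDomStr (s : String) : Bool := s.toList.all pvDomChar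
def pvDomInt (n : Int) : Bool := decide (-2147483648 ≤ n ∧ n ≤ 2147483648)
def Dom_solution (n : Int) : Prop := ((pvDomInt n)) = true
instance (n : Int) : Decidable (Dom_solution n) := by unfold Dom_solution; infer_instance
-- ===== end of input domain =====

-- B replaces A's while-loop + list + reverse + join by a three-line recursion on the
-- quotient that emits the most-significant digit first ('simpler'; same asymptotic cost).


-- ===== PORT A =====
-- fuel = number of remaining loop iterations; n.toNat + 1 always suffices (n strictly
-- decreases each iteration and the loop exits at 0), so the guard is never hit on Pre_.
def solLoop : Nat → Int → List Int → List Int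
  | 0, _, lst => lst
  | f + 1, n, lst =>
    let q := PySem.Int.floordiv n 3
    let r := PySem.Int.mod n 3
    let q := if r = 0 then q - 1 else q
    let lst := lst ++ [PySem.List.pyGetD [4, 1, 2] r 0]
    let n := PySem.Int.floordiv (n - 1) 3
    if q = 0 then lst else solLoop f n lst

def solution (n : Int) : String :=
  let lst := solLoop (n.toNat + 1) n []
  let lst := (PySem.List.slice? lst none none (-1)).getD []
  PySem.Str.join "" (lst.map PySem.Int.toStr)

-- ===== PORT B =====
-- fuel = recursion depth; n.toNat always suffices on Pre_, the 0-fuel guard is never hit.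
def solAltGo : Nat → Int → String
  | f, n =>
    if n = 0 then "" else
      match f with
      | 0 => ""
      | f + 1 =>
        solAltGo f (PySem.Int.floordiv (n - 1) 3) ++
          ((PySem.Str.pyGet? "124" (PySem.Int.mod (n - 1) 3)).elim "" (fun c => String.ofList [c]))

def solution_alt (n : Int) : String := solAltGo n.toNat n

-- ===== PRECONDITION & SPEC =====
-- Pre_ excludes n ≤ 0, on which Python A never returns (its while-loop diverges).
def Pre_solution (n : Int) : Prop := 1 ≤ n
instance (n : Int) : Decidable (Pre_solution n) := by unfold Pre_solution; infer_instance
def pvWitness_solution : Int := (10)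

def Spec_solution (n : Int) (out : String) : Prop := out = solution_alt n
instance (n : Int) (out : String) : Decidable (Spec_solution n out) := by unfold Spec_solution; infer_instance

-- ===== CLAIM (what is proved, stated in full; the proofs are below) =====
def Claim_equal_solution : Prop := ∀ (n : Int), Dom_solution n → Pre_solution n → Spec_solution n (solution n)

-- ===== LEMMAS AND PROOFS =====

-- empty separator join is flatten
theorem charsJoin_nil_eq_flatten (l : List (List Char)) :
    PySem.Chars.join [] l = l.flatten := by
  induction l with
  | nil => simp [PySem.Chars.join, List.intercalate]
  | cons a t ih =>
    cases t with
    | nil => simp [PySem.Chars.join, List.intercalate]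
    | cons b u =>
      simp only [PySem.Chars.join, List.intercalate] at *
      simp [List.intersperse] at *
      simp [ih]

-- the loop accumulator is append-only
theorem solLoop_acc (f : Nat) : ∀ (n : Int) (lst : List Int),
    solLoop f n lst = lst ++ solLoop f n [] := by
  induction f with
  | zero => intro n lst; simp [solLoop]
  | succ f ih =>
    intro n lst
    simp only [solLoop, List.nil_append]
    split_ifs
    all_goals try rfl
    all_goals simp
    all_goals ((conv_lhs => rw [ih]); (conv_rhs => rw [ih]); simp)

-- core induction: the reversed digit list of A, joined char-wise, is B's string
theorem main_lemma : ∀ (m : Nat) (n : Int) (f g : Nat), n.toNat = m → 1 ≤ n →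
    n.toNat ≤ f → n.toNat ≤ g →
    ((solLoop f n []).reverse.map PySem.Int.toChars).flatten = (solAltGo g n).toList := by
  intro m
  induction m using Nat.strong_induction_on with
  | _ m ih =>
    intro n f g hm h1 hf hg
    obtain ⟨f, rfl⟩ : ∃ f', f = f' + 1 := ⟨f - 1, by omega⟩
    obtain ⟨g, rfl⟩ : ∃ g', g = g' + 1 := ⟨g - 1, by omega⟩
    have h3 : (0:Int) < 3 := by norm_num
    have hmod : PySem.Int.mod n 3 = n % 3 := PySem.Int.mod_eq_emod_of_pos h3
    have hmod' : PySem.Int.mod (n-1) 3 = (n-1) % 3 := PySem.Int.mod_eq_emod_of_pos h3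
    have hdiv' : PySem.Int.floordiv (n-1) 3 = (n-1) / 3 := PySem.Int.floordiv_eq_ediv_of_pos h3
    have hq : (if PySem.Int.mod n 3 = 0 then PySem.Int.floordiv n 3 - 1 else PySem.Int.floordiv n 3)
        = (n-1) / 3 := by
      rw [hmod, PySem.Int.floordiv_eq_ediv_of_pos h3]
      split_ifs with h0 <;> omega
    have hn' : 0 ≤ (n-1) / 3 ∧ (n-1) / 3 < n := by omega
    -- the digit A emits, as characters, is the digit B emits
    have hdig : PySem.Int.toChars (PySem.List.pyGetD [4, 1, 2] (n % 3) 0)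
        = ((PySem.List.pyGet? ['1', '2', '4'] ((n-1) % 3)).elim "" fun c => String.ofList [c]).toList := by
      have hr : n % 3 = 0 ∨ n % 3 = 1 ∨ n % 3 = 2 := by omega
      rcases hr with h | h | h
      · rw [h, (by omega : (n-1) % 3 = 2)]; decide
      · rw [h, (by omega : (n-1) % 3 = 0)]; decide
      · rw [h, (by omega : (n-1) % 3 = 1)]; decide
    simp only [solLoop, solAltGo]
    rw [if_neg (by omega : ¬ n = 0), hq, hdiv']
    by_cases hz : (n-1) / 3 = 0
    · rw [if_pos hz, hz]
      have hb : solAltGo g 0 = "" := by unfold solAltGo; rfl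
      rw [hb]
      simpa [PySem.Str.pyGet?] using hdig
    · rw [if_neg hz]
      rw [solLoop_acc]
      have hih := ih ((n-1)/3).toNat (by omega) ((n-1)/3) f g rfl (by omega) (by omega) (by omega)
      simp [PySem.Str.pyGet?, hdig]
      rw [← List.map_reverse]
      exact hih

-- ===== VERDICT (by name: the statement is the Claim_ definition above) =====
theorem solution_spec : Claim_equal_solution := by
  intro n _ hpre
  unfold Pre_solution at hpre
  unfold Spec_solution solution solution_alt
  simp only [PySem.List.slice?_none_none_neg_one, Option.getD_some]
  apply String.toList_inj.mp
  have hmain := main_lemma n.toNat n (n.toNat + 1) n.toNat rfl hpre (by omega) (by omega)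
  rw [← hmain]
  simp [PySem.Str.join, charsJoin_nil_eq_flatten, Function.comp_def, PySem.Int.toList_toStr]
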